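-- pv_equiv track=rewrite | github.com/paolamoura/p1lp1 | aparta_divisiveis.py | aparta
-- ===== SOURCE A (Python) =====
-- def eh_divisivel(num, k):
--     return num % k == 0
--
-- def aparta(nums, k):
--     cont_divisiveis = 0
--     i = len(nums) - 1
--     while i >= 0:
--         if eh_divisivel(nums[i], k):
--             cont_divisiveis += 1
--             j = i
--             while j < len(nums) - 1 and not eh_divisivel(nums[j + 1], k):
--                 nums[j + 1], nums[j] = nums[j], nums[j + 1]
--                 j += 1
--         i -= 1
--     return cont_divisiveis
-- ===== SOURCE B (Python) =====
-- def aparta(nums, k):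
--     nums.sort(key=lambda x: x % k == 0)
--     return sum(1 for x in nums if x % k == 0)
-- ===== Notes on version B (the rewrite author's own statement) =====
-- stated objective: idiomatic
-- what changed: Replaces the hand-written O(n^2) bubbling of divisibles to the end by one stable in-place sort on the boolean key (x % k == 0) plus a single counting pass.
import Mathlib
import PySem

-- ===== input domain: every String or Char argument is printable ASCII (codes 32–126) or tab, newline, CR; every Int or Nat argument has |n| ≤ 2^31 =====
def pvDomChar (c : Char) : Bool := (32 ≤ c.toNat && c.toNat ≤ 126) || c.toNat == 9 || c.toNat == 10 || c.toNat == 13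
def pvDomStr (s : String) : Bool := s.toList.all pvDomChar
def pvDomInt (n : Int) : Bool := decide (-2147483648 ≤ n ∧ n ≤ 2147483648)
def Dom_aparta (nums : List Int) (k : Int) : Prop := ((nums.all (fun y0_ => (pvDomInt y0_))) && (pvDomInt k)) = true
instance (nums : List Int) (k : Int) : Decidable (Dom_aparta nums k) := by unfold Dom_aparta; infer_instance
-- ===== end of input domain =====

-- B replaces A's hand-written bubbling of divisibles to the end by one stable sort on the
-- boolean key (x % k == 0) plus a counting pass (idiomatic). Both Pythons mutate nums in
-- place and produce the IDENTICAL final list (stable partition); the theorems here are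
-- about the return value (the count of divisibles).

-- ===== PORT A =====
def ehDiv (num k : Int) : Bool := PySem.Int.mod num k == 0

-- inner while loop: bubble the element at index j rightward past non-divisibles
def apartaBubble (k : Int) (nums : List Int) (j : Nat) : List Int :=
  if h : j + 1 < nums.length ∧ ¬ (ehDiv (nums.getD (j+1) 0) k) then
    apartaBubble k ((nums.set j (nums.getD (j+1) 0)).set (j+1) (nums.getD j 0)) (j+1)
  else nums
termination_by nums.length - j
decreasing_by simp only [List.length_set]; omega

-- outer while loop: i runs len(nums)-1 down to 0 (argument is i+1, 0 = loop done)
def apartaOuter (k : Int) : Nat → List Int → Int → Int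
  | 0, _, cont => cont
  | (i+1), nums, cont =>
    if ehDiv (nums.getD i 0) k then apartaOuter k i (apartaBubble k nums i) (cont + 1)
    else apartaOuter k i nums cont

def aparta (nums : List Int) (k : Int) : Int :=
  apartaOuter k nums.length nums 0

-- ===== PORT B =====
def aparta_alt (nums : List Int) (k : Int) : Int :=
  -- nums.sort(key=lambda x: x % k == 0): stable sort, False (0) before True (1)
  let s := PySem.List.sorted nums (fun x => if PySem.Int.mod x k == 0 then (1 : Int) else 0) false
  -- sum(1 for x in nums if x % k == 0) over the (sorted-in-place) list
  ((s.filter (fun x => PySem.Int.mod x k == 0)).length : Int)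

-- ===== PRECONDITION & SPEC =====
-- Pre_ excludes exactly the inputs where Python raises: k = 0 with nums non-empty
-- (ZeroDivisionError in both A and B).
def Pre_aparta (nums : List Int) (k : Int) : Prop := k ≠ 0 ∨ nums = []
instance (nums : List Int) (k : Int) : Decidable (Pre_aparta nums k) := by unfold Pre_aparta; infer_instance

def pvWitness_aparta : List Int × Int := ([6, 4, 9, 5], 3)

def Spec_aparta (nums : List Int) (k : Int) (out : Int) : Prop := out = aparta_alt nums k
instance (nums : List Int) (k : Int) (out : Int) : Decidable (Spec_aparta nums k out) := by unfold Spec_aparta; infer_instance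

-- ===== CLAIM =====
def Claim_equal_aparta : Prop := ∀ (nums : List Int) (k : Int), Dom_aparta nums k → Pre_aparta nums k → Spec_aparta nums k (aparta nums k)

-- ===== LEMMAS AND PROOFS =====

theorem apartaBubble_length (k : Int) (nums : List Int) (j : Nat) :
    (apartaBubble k nums j).length = nums.length := by
  fun_induction apartaBubble k nums j with
  | case1 nums j h ih => simpa using ih
  | case2 nums j h => rfl

theorem apartaBubble_take (k : Int) (nums : List Int) (j : Nat) :
    (apartaBubble k nums j).take j = nums.take j := by
  fun_induction apartaBubble k nums j with
  | case1 nums j h ih =>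
    have h1 : (apartaBubble k ((nums.set j (nums.getD (j+1) 0)).set (j+1) (nums.getD j 0)) (j+1)).take j
        = ((apartaBubble k ((nums.set j (nums.getD (j+1) 0)).set (j+1) (nums.getD j 0)) (j+1)).take (j+1)).take j := by
      rw [List.take_take]; simp
    rw [h1, ih, List.take_take]
    simp only [Nat.min_self, inf_of_le_left, Nat.le_succ]
    -- positions < j are untouched by the two sets at j and j+1
    apply List.ext_getElem
    · simp
    · intro n h1 h2
      simp only [List.getElem_take, List.getElem_set]
      have hn : n < j := by simp at h1; omega
      rw [if_neg (by omega), if_neg (by omega)]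
  | case2 nums j h => rfl

theorem apartaOuter_count (k : Int) (i : Nat) (nums : List Int) (cont : Int)
    (hi : i ≤ nums.length) :
    apartaOuter k i nums cont = cont + (((nums.take i).filter (fun x => ehDiv x k)).length : Int) := by
  induction i generalizing nums cont with
  | zero => simp [apartaOuter]
  | succ i ih =>
    have hlt : i < nums.length := by omega
    have hget : nums.getD i 0 = nums[i] := by
      simp [List.getD, List.getElem?_eq_getElem hlt]
    have hfilt : ((nums.take (i+1)).filter (fun x => ehDiv x k)).length
        = ((nums.take i).filter (fun x => ehDiv x k)).length
          + (if ehDiv nums[i] k then 1 else 0) := by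
      rw [show nums.take (i+1) = nums.take i ++ [nums[i]] by
            rw [List.take_succ, List.getElem?_eq_getElem hlt]; rfl,
          List.filter_append]
      by_cases hd : ehDiv nums[i] k <;> simp [hd]
    rw [apartaOuter, hget]
    by_cases hd : ehDiv nums[i] k
    · rw [if_pos hd, ih _ _ (by rw [apartaBubble_length]; omega), apartaBubble_take, hfilt,
        if_pos hd]
      push_cast; ring
    · rw [if_neg hd, ih _ _ (by omega), hfilt, if_neg hd]
      push_cast; ring

theorem aparta_eq_filter (nums : List Int) (k : Int) :
    aparta nums k = ((nums.filter (fun x => ehDiv x k)).length : Int) := by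
  rw [aparta, apartaOuter_count k nums.length nums 0 le_rfl]
  simp

theorem aparta_alt_eq_filter (nums : List Int) (k : Int) :
    aparta_alt nums k = ((nums.filter (fun x => ehDiv x k)).length : Int) := by
  unfold aparta_alt
  have hp : (PySem.List.sorted nums (fun x => if PySem.Int.mod x k == 0 then (1 : Int) else 0) false).Perm nums :=
    PySem.List.sorted_perm _ _ _
  have := (hp.filter (fun x => PySem.Int.mod x k == 0)).length_eq
  simp only [ehDiv]
  omega

-- ===== VERDICT =====
theorem aparta_spec : Claim_equal_aparta := by
  intro nums k _ _
  unfold Spec_aparta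
  rw [aparta_eq_filter, aparta_alt_eq_filter]
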